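-- pv_equiv track=rewrite | github.com/tflati/pipeline_creator | project/django_server/pipeline_manager/views.py | tags_compatibles
-- ===== SOURCE A (Python) =====
-- def tags_compatibles(g1, g2):
--     """
--         g2 usually are the pipeline's tags (or step's tags) and
--         g1 are the bioentity's tags
--         every type of g2 has to be contained in g1 and the intersection must not be empty
--         if g1 is contained in g2 then return compatible
--         if g1 intersects g2 then return compatible
--     """
--
--     typetag1 = {}
--     for x in g1:
--         if x["type"] not in typetag1:
--             typetag1[x["type"]] = set()
--         typetag1[x["type"]].add(x["name"])
--
--     typetag2 = {}
--     for x in g2: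
--         if "name" not in x: continue
--
--         if x["type"] not in typetag2:
--             typetag2[x["type"]] = set()
--         typetag2[x["type"]].add(x["name"])
--
--     compatible = True
--
--     for type in typetag2:
--         if type not in typetag1 or len(typetag2[type].intersection(typetag1[type])) == 0:
--             compatible = False
--             break
--
--     return compatible
-- ===== SOURCE B (Python) =====
-- def tags_compatibles(g1, g2):
--     # One flat pass: set of (type, name) pairs from g1, then per-type matched flags
--     # over g2; no grouping dicts and no set intersections.
--     pairs1 = {(x["type"], x["name"]) for x in g1}
--     matched = {}
--     for x in g2:
--         if "name" not in x:
--             continue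
--         t = x["type"]
--         if t not in matched:
--             matched[t] = False
--         if (t, x["name"]) in pairs1:
--             matched[t] = True
--     return all(matched.values())
-- ===== Notes on version B (the rewrite author's own statement) =====
-- stated objective: alternative
-- what changed: Replaces A's two per-type grouping dicts of name-sets and per-type set intersections by one flat set of (type, name) pairs from g1 plus a single pass over g2 that maintains per-type matched booleans, so the grouping and intersection steps disappear.
import Mathlib
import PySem

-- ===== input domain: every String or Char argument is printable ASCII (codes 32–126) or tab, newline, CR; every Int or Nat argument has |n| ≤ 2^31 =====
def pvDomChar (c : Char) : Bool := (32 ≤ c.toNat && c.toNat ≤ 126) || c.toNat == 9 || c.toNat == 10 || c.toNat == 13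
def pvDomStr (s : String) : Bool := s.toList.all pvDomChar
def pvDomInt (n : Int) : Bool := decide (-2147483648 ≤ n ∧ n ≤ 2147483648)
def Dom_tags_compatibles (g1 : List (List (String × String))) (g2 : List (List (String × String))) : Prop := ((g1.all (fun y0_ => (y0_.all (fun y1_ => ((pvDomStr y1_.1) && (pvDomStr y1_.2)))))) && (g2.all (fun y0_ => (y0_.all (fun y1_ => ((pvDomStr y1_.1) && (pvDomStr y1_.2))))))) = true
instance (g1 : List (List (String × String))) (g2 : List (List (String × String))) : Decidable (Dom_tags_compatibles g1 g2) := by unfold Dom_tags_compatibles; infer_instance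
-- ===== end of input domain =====

-- B replaces A's two grouping dicts of name-sets plus per-type set intersections by one
-- flat set of (type, name) pairs from g1 and a single pass over g2 maintaining per-type
-- matched booleans (objective: alternative decomposition, similar cost).

-- x[k] for the Python dict x (assoc list, first match); "" only reachable outside Pre_
def pvGetD (x : List (String × String)) (k : String) : String :=
  match x.find? (fun p => p.1 == k) with
  | some p => p.2
  | none => ""

-- 'k in x'
def pvHas (x : List (String × String)) (k : String) : Bool :=
  (x.find? (fun p => p.1 == k)).isSome

-- ===== PORT A =====
-- body of A's two grouping loops: if x["type"] not in d: d[x["type"]] = set(); d[x["type"]].add(x["name"])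
def pvStepA (d : PySem.Dict String (PySem.Set String)) (x : List (String × String)) : PySem.Dict String (PySem.Set String) :=
  let d := if d.contains (pvGetD x "type") then d else d.insert (pvGetD x "type") PySem.Set.empty
  d.modify (pvGetD x "type") PySem.Set.empty (fun s => PySem.Set.add s (pvGetD x "name"))

-- A's first grouping loop (over g1)
def pvTypetag1 (g1 : List (List (String × String))) : PySem.Dict String (PySem.Set String) :=
  g1.foldl pvStepA PySem.Dict.empty

-- A's second grouping loop (over g2, with the 'continue' guard)
def pvTypetag2 (g2 : List (List (String × String))) : PySem.Dict String (PySem.Set String) :=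
  g2.foldl (fun d x => if !(pvHas x "name") then d else pvStepA d x) PySem.Dict.empty

-- A's 'for type in typetag2: … break' loop
def pvLoopA (t1 t2 : PySem.Dict String (PySem.Set String)) : List String → Bool
  | [] => true
  | t :: ts =>
      if !(t1.contains t) || (PySem.Set.len (PySem.Set.inter (t2.getD t PySem.Set.empty) (t1.getD t PySem.Set.empty)) == 0)
      then false
      else pvLoopA t1 t2 ts

def tags_compatibles (g1 : List (List (String × String))) (g2 : List (List (String × String))) : Bool :=
  pvLoopA (pvTypetag1 g1) (pvTypetag2 g2) (pvTypetag2 g2).keys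

-- ===== PORT B =====
-- B's set of (type, name) pairs from g1
def pvPairs1 (g1 : List (List (String × String))) : PySem.Set (String × String) :=
  PySem.Set.ofList (g1.map (fun x => (pvGetD x "type", pvGetD x "name")))

-- body of B's single loop over g2
def pvStepB (ps : PySem.Set (String × String)) (m : PySem.Dict String Bool) (x : List (String × String)) : PySem.Dict String Bool :=
  if !(pvHas x "name") then m else
  let t := pvGetD x "type"
  let m := if m.contains t then m else m.insert t false
  if PySem.Set.contains ps (t, pvGetD x "name") then m.insert t true else m

def tags_compatibles_alt (g1 : List (List (String × String))) (g2 : List (List (String × String))) : Bool :=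
  (g2.foldl (pvStepB (pvPairs1 g1)) PySem.Dict.empty).values.all (fun b => b)

-- ===== PRECONDITION & SPEC =====
-- Pre_ excludes exactly the inputs on which the Python A raises KeyError: a g1 entry
-- missing "type" or "name", or a g2 entry that has "name" but no "type".
def Pre_tags_compatibles (g1 : List (List (String × String))) (g2 : List (List (String × String))) : Prop :=
  (∀ x ∈ g1, pvHas x "type" = true ∧ pvHas x "name" = true) ∧
  (∀ x ∈ g2, pvHas x "name" = true → pvHas x "type" = true)
instance (g1 : List (List (String × String))) (g2 : List (List (String × String))) : Decidable (Pre_tags_compatibles g1 g2) := by unfold Pre_tags_compatibles; infer_instance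

def pvWitness_tags_compatibles : (List (List (String × String))) × (List (List (String × String))) :=
  ([[("type", "a"), ("name", "n")]], [[("type", "a"), ("name", "n")]])

def Spec_tags_compatibles (g1 : List (List (String × String))) (g2 : List (List (String × String))) (out : Bool) : Prop := out = tags_compatibles_alt g1 g2
instance (g1 : List (List (String × String))) (g2 : List (List (String × String))) (out : Bool) : Decidable (Spec_tags_compatibles g1 g2 out) := by unfold Spec_tags_compatibles; infer_instance

-- ===== CLAIM (what is proved, stated in full; the proofs are below) =====
def Claim_equal_tags_compatibles : Prop := ∀ (g1 : List (List (String × String))) (g2 : List (List (String × String))), Dom_tags_compatibles g1 g2 → Pre_tags_compatibles g1 g2 → Spec_tags_compatibles g1 g2 (tags_compatibles g1 g2)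

-- ===== LEMMAS AND PROOFS =====

theorem pvStepA_getD (d : PySem.Dict String (PySem.Set String)) (x : List (String × String)) (t : String) :
    (pvStepA d x).getD t PySem.Set.empty =
      if t = pvGetD x "type" then PySem.Set.add (d.getD t PySem.Set.empty) (pvGetD x "name")
      else d.getD t PySem.Set.empty := by
  unfold pvStepA
  by_cases h : d.contains (pvGetD x "type") = true
  · rw [if_pos h, PySem.Dict.getD_modify]
    by_cases ht : t = pvGetD x "type"
    · subst ht; rw [if_pos rfl]
    · rw [if_neg ht, if_neg ht]
  · rw [if_neg h, PySem.Dict.getD_modify]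
    have h' : d.contains (pvGetD x "type") = false := by simpa using h
    by_cases ht : t = pvGetD x "type"
    · subst ht
      rw [if_pos rfl, if_pos rfl, PySem.Dict.getD_insert, if_pos rfl,
        PySem.Dict.getD_of_not_contains d _ h']
    · rw [if_neg ht, if_neg ht, PySem.Dict.getD_insert, if_neg ht]

theorem pvStepA_contains (d : PySem.Dict String (PySem.Set String)) (x : List (String × String)) (t : String) :
    ((pvStepA d x).contains t = true) ↔ (t = pvGetD x "type" ∨ d.contains t = true) := by
  unfold pvStepA
  by_cases h : d.contains (pvGetD x "type") = true
  · rw [if_pos h, PySem.Dict.contains_modify]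
    by_cases ht : t = pvGetD x "type" <;> simp [ht]
  · rw [if_neg h, PySem.Dict.contains_modify, PySem.Dict.contains_insert]
    by_cases ht : t = pvGetD x "type" <;> simp [ht]

-- A's g1 grouping loop: set membership and key membership
theorem foldA1_getD (l : List (List (String × String)))
    (d : PySem.Dict String (PySem.Set String)) (t n : String) :
    (n ∈ (l.foldl pvStepA d).getD t PySem.Set.empty) ↔
      (n ∈ d.getD t PySem.Set.empty ∨ ∃ y ∈ l, pvGetD y "type" = t ∧ pvGetD y "name" = n) := by
  induction l generalizing d with
  | nil => simp
  | cons y l ih =>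
    simp only [List.foldl_cons, ih, List.mem_cons, pvStepA_getD]
    by_cases ht : t = pvGetD y "type"
    · rw [if_pos ht, PySem.Set.mem_add]
      subst ht
      aesop
    · rw [if_neg ht]
      aesop

theorem foldA1_contains (l : List (List (String × String)))
    (d : PySem.Dict String (PySem.Set String)) (t : String) :
    ((l.foldl pvStepA d).contains t = true) ↔
      (d.contains t = true ∨ ∃ y ∈ l, pvGetD y "type" = t) := by
  induction l generalizing d with
  | nil => simp
  | cons y l ih =>
    simp only [List.foldl_cons, ih, List.mem_cons, pvStepA_contains]
    aesop

-- A's g2 grouping loop (with the 'continue' guard)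
theorem foldA2_getD (l : List (List (String × String)))
    (d : PySem.Dict String (PySem.Set String)) (t n : String) :
    (n ∈ (l.foldl (fun d x => if !(pvHas x "name") then d else pvStepA d x) d).getD t PySem.Set.empty) ↔
      (n ∈ d.getD t PySem.Set.empty ∨
        ∃ y ∈ l, pvHas y "name" = true ∧ pvGetD y "type" = t ∧ pvGetD y "name" = n) := by
  induction l generalizing d with
  | nil => simp
  | cons y l ih =>
    simp only [List.foldl_cons, List.mem_cons]
    by_cases hn : pvHas y "name" = true
    · have hg : (!(pvHas y "name")) = false := by simp [hn]
      rw [hg]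
      simp only [Bool.false_eq_true, if_false, ih, pvStepA_getD]
      by_cases ht : t = pvGetD y "type"
      · rw [if_pos ht, PySem.Set.mem_add]
        subst ht
        aesop
      · rw [if_neg ht]
        aesop
    · have hn' : pvHas y "name" = false := by simpa using hn
      have hg : (!(pvHas y "name")) = true := by simp [hn']
      rw [hg]
      simp only [if_true, ih]
      aesop

theorem foldA2_contains (l : List (List (String × String)))
    (d : PySem.Dict String (PySem.Set String)) (t : String) :
    ((l.foldl (fun d x => if !(pvHas x "name") then d else pvStepA d x) d).contains t = true) ↔
      (d.contains t = true ∨ ∃ y ∈ l, pvHas y "name" = true ∧ pvGetD y "type" = t) := by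
  induction l generalizing d with
  | nil => simp
  | cons y l ih =>
    simp only [List.foldl_cons, List.mem_cons]
    by_cases hn : pvHas y "name" = true
    · have hg : (!(pvHas y "name")) = false := by simp [hn]
      rw [hg]
      simp only [Bool.false_eq_true, if_false, ih, pvStepA_contains]
      aesop
    · have hn' : pvHas y "name" = false := by simpa using hn
      have hg : (!(pvHas y "name")) = true := by simp [hn']
      rw [hg]
      simp only [if_true, ih]
      aesop

theorem pvTypetag1_mem (g1 : List (List (String × String))) (t n : String) :
    (n ∈ (pvTypetag1 g1).getD t PySem.Set.empty) ↔
      ∃ y ∈ g1, pvGetD y "type" = t ∧ pvGetD y "name" = n := by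
  unfold pvTypetag1
  rw [foldA1_getD]
  simp [PySem.Dict.getD_empty, PySem.Set.empty]

theorem pvTypetag1_contains (g1 : List (List (String × String))) (t : String) :
    ((pvTypetag1 g1).contains t = true) ↔ ∃ y ∈ g1, pvGetD y "type" = t := by
  unfold pvTypetag1
  rw [foldA1_contains]
  simp [PySem.Dict.contains_empty]

theorem pvTypetag2_mem (g2 : List (List (String × String))) (t n : String) :
    (n ∈ (pvTypetag2 g2).getD t PySem.Set.empty) ↔
      ∃ x ∈ g2, pvHas x "name" = true ∧ pvGetD x "type" = t ∧ pvGetD x "name" = n := by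
  unfold pvTypetag2
  rw [foldA2_getD]
  simp [PySem.Dict.getD_empty, PySem.Set.empty]

theorem pvTypetag2_keys (g2 : List (List (String × String))) (t : String) :
    (t ∈ (pvTypetag2 g2).keys) ↔ ∃ x ∈ g2, pvHas x "name" = true ∧ pvGetD x "type" = t := by
  rw [← PySem.Dict.contains_iff_mem_keys]
  unfold pvTypetag2
  rw [foldA2_contains]
  simp [PySem.Dict.contains_empty]

-- B's loop body lemmas
theorem pvSetdefault_getD (m : PySem.Dict String Bool) (t0 t : String) :
    ((if m.contains t0 then m else m.insert t0 false).getD t false) = m.getD t false := by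
  by_cases hc : m.contains t0 = true
  · rw [if_pos hc]
  · rw [if_neg hc, PySem.Dict.getD_insert]
    have hc' : m.contains t0 = false := by simpa using hc
    by_cases ht : t = t0
    · subst ht
      rw [if_pos rfl, PySem.Dict.getD_of_not_contains m false hc']
    · rw [if_neg ht]

theorem pvSetdefault_contains (m : PySem.Dict String Bool) (t0 t : String) :
    (((if m.contains t0 then m else m.insert t0 false).contains t) = true) ↔
      (t = t0 ∨ m.contains t = true) := by
  by_cases hc : m.contains t0 = true
  · rw [if_pos hc]
    by_cases ht : t = t0
    · subst ht; simp [hc]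
    · simp [ht]
  · rw [if_neg hc, PySem.Dict.contains_insert]
    by_cases ht : t = t0 <;> simp [ht]

theorem pvStepB_getD (ps : PySem.Set (String × String)) (m : PySem.Dict String Bool)
    (x : List (String × String)) (t : String) :
    ((pvStepB ps m x).getD t false = true) ↔
      (m.getD t false = true ∨
        (pvHas x "name" = true ∧ pvGetD x "type" = t ∧
          PySem.Set.contains ps (t, pvGetD x "name") = true)) := by
  unfold pvStepB
  by_cases hn : pvHas x "name" = true
  · have hg : (!(pvHas x "name")) = false := by simp [hn]
    rw [hg]
    simp only [Bool.false_eq_true, if_false]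
    by_cases hp : PySem.Set.contains ps (pvGetD x "type", pvGetD x "name") = true
    · rw [if_pos hp, PySem.Dict.getD_insert]
      by_cases ht : t = pvGetD x "type"
      · subst ht
        rw [if_pos rfl]
        exact ⟨fun _ => Or.inr ⟨hn, rfl, hp⟩, fun _ => rfl⟩
      · rw [if_neg ht, pvSetdefault_getD]
        constructor
        · exact Or.inl
        · rintro (h | ⟨_, hty, _⟩)
          · exact h
          · exact absurd hty.symm ht
    · rw [if_neg hp, pvSetdefault_getD]
      constructor
      · exact Or.inl
      · rintro (h | ⟨_, hty, hps⟩)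
        · exact h
        · subst hty; exact absurd hps hp
  · have hn' : pvHas x "name" = false := by simpa using hn
    have hg : (!(pvHas x "name")) = true := by simp [hn']
    rw [hg]
    simp [hn']

theorem pvStepB_contains (ps : PySem.Set (String × String)) (m : PySem.Dict String Bool)
    (x : List (String × String)) (t : String) :
    ((pvStepB ps m x).contains t = true) ↔
      (m.contains t = true ∨ (pvHas x "name" = true ∧ pvGetD x "type" = t)) := by
  unfold pvStepB
  by_cases hn : pvHas x "name" = true
  · have hg : (!(pvHas x "name")) = false := by simp [hn]
    rw [hg]
    simp only [Bool.false_eq_true, if_false]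
    by_cases hp : PySem.Set.contains ps (pvGetD x "type", pvGetD x "name") = true
    · rw [if_pos hp, PySem.Dict.contains_insert, Bool.or_eq_true, beq_iff_eq,
        pvSetdefault_contains]
      aesop
    · rw [if_neg hp, pvSetdefault_contains]
      aesop
  · have hn' : pvHas x "name" = false := by simpa using hn
    have hg : (!(pvHas x "name")) = true := by simp [hn']
    rw [hg]
    simp [hn']

theorem pvStepB_nodup (ps : PySem.Set (String × String)) (m : PySem.Dict String Bool)
    (x : List (String × String)) (h : m.keys.Nodup) : (pvStepB ps m x).keys.Nodup := by
  unfold pvStepB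
  have h1 : (if m.contains (pvGetD x "type") then m else m.insert (pvGetD x "type") false).keys.Nodup := by
    by_cases hc : m.contains (pvGetD x "type") = true
    · rw [if_pos hc]; exact h
    · rw [if_neg hc]; exact PySem.Dict.nodup_keys_insert _ _ _ h
  by_cases hn : pvHas x "name" = true
  · have hg : (!(pvHas x "name")) = false := by simp [hn]
    rw [hg]
    simp only [Bool.false_eq_true, if_false]
    by_cases hp : PySem.Set.contains ps (pvGetD x "type", pvGetD x "name") = true
    · rw [if_pos hp]; exact PySem.Dict.nodup_keys_insert _ _ _ h1
    · rw [if_neg hp]; exact h1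
  · have hn' : pvHas x "name" = false := by simpa using hn
    have hg : (!(pvHas x "name")) = true := by simp [hn']
    rw [hg]
    simpa using h

theorem foldB_getD (ps : PySem.Set (String × String)) (l : List (List (String × String)))
    (m : PySem.Dict String Bool) (t : String) :
    ((l.foldl (pvStepB ps) m).getD t false = true) ↔
      (m.getD t false = true ∨
        ∃ x ∈ l, pvHas x "name" = true ∧ pvGetD x "type" = t ∧
          PySem.Set.contains ps (t, pvGetD x "name") = true) := by
  induction l generalizing m with
  | nil => simp
  | cons y l ih =>
    simp only [List.foldl_cons, ih, pvStepB_getD, List.mem_cons]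
    aesop

theorem foldB_contains (ps : PySem.Set (String × String)) (l : List (List (String × String)))
    (m : PySem.Dict String Bool) (t : String) :
    ((l.foldl (pvStepB ps) m).contains t = true) ↔
      (m.contains t = true ∨ ∃ x ∈ l, pvHas x "name" = true ∧ pvGetD x "type" = t) := by
  induction l generalizing m with
  | nil => simp
  | cons y l ih =>
    simp only [List.foldl_cons, ih, pvStepB_contains, List.mem_cons]
    aesop

theorem foldB_nodup (ps : PySem.Set (String × String)) (l : List (List (String × String)))
    (m : PySem.Dict String Bool) (h : m.keys.Nodup) : (l.foldl (pvStepB ps) m).keys.Nodup := by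
  induction l generalizing m with
  | nil => exact h
  | cons y l ih => exact ih _ (pvStepB_nodup ps m y h)

-- A's break-loop returns true iff every key passes the test
theorem pvLoopA_eq_true (t1 t2 : PySem.Dict String (PySem.Set String)) (ks : List String) :
    (pvLoopA t1 t2 ks = true) ↔
      ∀ t ∈ ks, t1.contains t = true ∧
        (PySem.Set.len (PySem.Set.inter (t2.getD t PySem.Set.empty) (t1.getD t PySem.Set.empty)) == 0) = false := by
  induction ks with
  | nil => simp [pvLoopA]
  | cons t ts ih =>
    unfold pvLoopA
    by_cases h : (!(t1.contains t) || (PySem.Set.len (PySem.Set.inter (t2.getD t PySem.Set.empty) (t1.getD t PySem.Set.empty)) == 0)) = true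
    · rw [if_pos h]
      constructor
      · intro hfalse; exact absurd hfalse (by simp)
      · intro hall
        obtain ⟨h1, h2⟩ := hall t (List.mem_cons_self)
        rcases Bool.or_eq_true _ _ ▸ h with h' | h'
        · rw [h1] at h'; exact absurd h' (by simp)
        · rw [h2] at h'; exact absurd h' (by simp)
    · rw [if_neg h, ih]
      have h'' : (!(t1.contains t) || (PySem.Set.len (PySem.Set.inter (t2.getD t PySem.Set.empty) (t1.getD t PySem.Set.empty)) == 0)) = false := by
        simpa using h
      rw [Bool.or_eq_false_iff] at h''
      obtain ⟨ha, hb⟩ := h''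
      have hac : t1.contains t = true := by simpa using ha
      constructor
      · intro hall t' ht'
        rcases List.mem_cons.mp ht' with h3 | h3
        · subst h3; exact ⟨hac, hb⟩
        · exact hall t' h3
      · intro hall t' ht'
        exact hall t' (List.mem_cons_of_mem _ ht')

-- a Set's length-is-zero test holds iff the set has no members
theorem pvSetLenZero (s : PySem.Set String) :
    ((PySem.Set.len s == 0) = true) ↔ ∀ n : String, n ∉ s := by
  simp [PySem.Set.len, List.eq_nil_iff_forall_not_mem]

-- membership in g1's pair set
theorem pvPairs1_mem (g1 : List (List (String × String))) (t n : String) :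
    ((t, n) ∈ pvPairs1 g1) ↔ ∃ y ∈ g1, pvGetD y "type" = t ∧ pvGetD y "name" = n := by
  unfold pvPairs1
  rw [PySem.Set.mem_ofList]
  aesop

-- both ports decide the same predicate
theorem portA_iff (g1 g2 : List (List (String × String))) :
    (tags_compatibles g1 g2 = true) ↔
      ∀ t : String, (∃ x ∈ g2, pvHas x "name" = true ∧ pvGetD x "type" = t) →
        ∃ n : String, (∃ x ∈ g2, pvHas x "name" = true ∧ pvGetD x "type" = t ∧ pvGetD x "name" = n) ∧
          (∃ y ∈ g1, pvGetD y "type" = t ∧ pvGetD y "name" = n) := by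
  unfold tags_compatibles
  rw [pvLoopA_eq_true]
  constructor
  · intro hall t ht
    obtain ⟨_, hb⟩ := hall t ((pvTypetag2_keys g2 t).mpr ht)
    have hne : ¬ ∀ n : String, n ∉ PySem.Set.inter ((pvTypetag2 g2).getD t PySem.Set.empty) ((pvTypetag1 g1).getD t PySem.Set.empty) :=
      fun hf => by
        have hx := (pvSetLenZero _).mpr hf
        rw [hx] at hb
        simp at hb
    push_neg at hne
    obtain ⟨n, hn⟩ := hne
    rw [PySem.Set.mem_inter] at hn
    exact ⟨n, (pvTypetag2_mem g2 t n).mp hn.1, (pvTypetag1_mem g1 t n).mp hn.2⟩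
  · intro hall t ht
    obtain ⟨n, hn2, hn1⟩ := hall t ((pvTypetag2_keys g2 t).mp ht)
    refine ⟨(pvTypetag1_contains g1 t).mpr ⟨hn1.choose, hn1.choose_spec.1, hn1.choose_spec.2.1⟩, ?_⟩
    have hmem : n ∈ PySem.Set.inter ((pvTypetag2 g2).getD t PySem.Set.empty) ((pvTypetag1 g1).getD t PySem.Set.empty) :=
      (PySem.Set.mem_inter _ _ _).mpr ⟨(pvTypetag2_mem g2 t n).mpr hn2, (pvTypetag1_mem g1 t n).mpr hn1⟩
    cases hzero : (PySem.Set.len (PySem.Set.inter ((pvTypetag2 g2).getD t PySem.Set.empty) ((pvTypetag1 g1).getD t PySem.Set.empty)) == 0) with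
    | false => rfl
    | true => exact absurd hmem ((pvSetLenZero _).mp hzero n)

theorem portB_iff (g1 g2 : List (List (String × String))) :
    (tags_compatibles_alt g1 g2 = true) ↔
      ∀ t : String, (∃ x ∈ g2, pvHas x "name" = true ∧ pvGetD x "type" = t) →
        ∃ n : String, (∃ x ∈ g2, pvHas x "name" = true ∧ pvGetD x "type" = t ∧ pvGetD x "name" = n) ∧
          (∃ y ∈ g1, pvGetD y "type" = t ∧ pvGetD y "name" = n) := by
  unfold tags_compatibles_alt
  have hnd : (g2.foldl (pvStepB (pvPairs1 g1)) PySem.Dict.empty).keys.Nodup :=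
    foldB_nodup _ g2 PySem.Dict.empty PySem.Dict.nodup_keys_empty
  rw [PySem.Dict.values_eq_map_keys _ hnd false]
  simp only [List.all_eq_true, List.mem_map]
  have hkeys : ∀ t, (t ∈ (g2.foldl (pvStepB (pvPairs1 g1)) PySem.Dict.empty).keys) ↔
      ∃ x ∈ g2, pvHas x "name" = true ∧ pvGetD x "type" = t := by
    intro t
    rw [← PySem.Dict.contains_iff_mem_keys, foldB_contains]
    simp [PySem.Dict.contains_empty]
  have hval : ∀ t, ((g2.foldl (pvStepB (pvPairs1 g1)) PySem.Dict.empty).getD t false = true) ↔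
      ∃ x ∈ g2, pvHas x "name" = true ∧ pvGetD x "type" = t ∧
        PySem.Set.contains (pvPairs1 g1) (t, pvGetD x "name") = true := by
    intro t
    rw [foldB_getD]
    simp [PySem.Dict.getD_empty]
  constructor
  · intro hall t ht
    have hmt : (g2.foldl (pvStepB (pvPairs1 g1)) PySem.Dict.empty).getD t false = true :=
      hall _ ⟨t, (hkeys t).mpr ht, rfl⟩
    obtain ⟨x, hx, hn', hty, hpsx⟩ := (hval t).mp hmt
    have hpair := (pvPairs1_mem g1 t (pvGetD x "name")).mp ((PySem.Set.contains_iff _ _).mp hpsx)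
    exact ⟨pvGetD x "name", ⟨x, hx, hn', hty, rfl⟩, hpair⟩
  · rintro hall b ⟨t, ht, rfl⟩
    obtain ⟨n, ⟨x, hx, hn', hty, hnn⟩, hy⟩ := hall t ((hkeys t).mp ht)
    refine (hval t).mpr ⟨x, hx, hn', hty, ?_⟩
    rw [PySem.Set.contains_iff, hnn]
    exact (pvPairs1_mem g1 t n).mpr hy

-- ===== VERDICT (by name: the statement is the Claim_ definition above) =====
theorem tags_compatibles_spec : Claim_equal_tags_compatibles := by
  intro g1 g2 _ _
  unfold Spec_tags_compatibles
  rw [Bool.eq_iff_iff, portA_iff, portB_iff]
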